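-- pv_equiv track=rewrite | github.com/fipl-hse/2024-2-level-labs | seminars/practice_3_lists.py | scramble
-- ===== SOURCE A (Python) =====
-- def scramble(words: list) -> bool:
--     """
--     Complete the function scramble(words: list)
--     that returns true if a portion of str1 characters can be rearranged to match str2,
--     otherwise returns false.
--     """
--     # student implementation goes here
--     str1 = words[0]
--     str2 = words[1]
--     for char in str2:
--         if char not in str1:
--             return False
--         str1 = str1.replace(char, '', 1)
--     return True
-- ===== SOURCE B (Python) =====
-- def scramble(words: list) -> bool:
--     """
--     Complete the function scramble(words: list)
--     that returns true if a portion of str1 characters can be rearranged to match str2,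
--     otherwise returns false.
--     """
--     str1 = words[0]
--     str2 = words[1]
--     avail = {}
--     for ch in str1:
--         avail[ch] = avail.get(ch, 0) + 1
--     need = {}
--     for ch in str2:
--         need[ch] = need.get(ch, 0) + 1
--     return all(n <= avail.get(ch, 0) for ch, n in need.items())
-- ===== Notes on version B (the rewrite author's own statement) =====
-- stated objective: alternative
-- what changed: Replaces A's per-character membership test plus destructive replace-first-occurrence on str1 by building two frequency dictionaries in single passes and comparing counts.
import Mathlib
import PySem

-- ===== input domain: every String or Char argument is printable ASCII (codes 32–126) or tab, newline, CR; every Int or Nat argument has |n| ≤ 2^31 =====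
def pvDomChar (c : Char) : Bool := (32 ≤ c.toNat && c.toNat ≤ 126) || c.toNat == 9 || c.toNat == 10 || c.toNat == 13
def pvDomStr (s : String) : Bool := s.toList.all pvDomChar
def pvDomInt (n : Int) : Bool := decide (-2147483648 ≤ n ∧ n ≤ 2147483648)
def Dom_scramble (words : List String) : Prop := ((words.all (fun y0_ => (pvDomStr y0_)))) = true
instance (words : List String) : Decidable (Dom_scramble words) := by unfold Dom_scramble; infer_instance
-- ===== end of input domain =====

-- B builds two frequency dictionaries in one pass each instead of A's per-character scan-and-remove; same return value.

-- ===== PORT A =====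
-- the for-loop over str2 with the mutable str1: `str1.replace(char, '', 1)` with a 1-char
-- pattern and empty replacement removes exactly the first occurrence of that char, which is
-- List.erase on the char list (exact), and `char in str1` for a single char is list membership (exact)
def scrambleGo (cs1 : List Char) (cs2 : List Char) : Bool :=
  match cs2 with
  | [] => true
  | c :: rest => if cs1.contains c then scrambleGo (cs1.erase c) rest else false

def scramble (words : List String) : Bool :=
  match PySem.List.pyGet? words 0, PySem.List.pyGet? words 1 with
  | some s1, some s2 => scrambleGo s1.toList s2.toList
  | _, _ => false  -- unreachable under Pre_ (IndexError in Python)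

-- ===== PORT B =====
def scramble_alt (words : List String) : Bool :=
  match PySem.List.pyGet? words 0 with
  | none => false  -- unreachable under Pre_ (IndexError in Python)
  | some s1 =>
  match PySem.List.pyGet? words 1 with
  | none => false  -- unreachable under Pre_ (IndexError in Python)
  | some s2 =>
    let avail := s1.toList.foldl (fun d c => d.insert c (d.getD c 0 + 1)) (PySem.Dict.empty : PySem.Dict Char Int)
    let need := s2.toList.foldl (fun d c => d.insert c (d.getD c 0 + 1)) (PySem.Dict.empty : PySem.Dict Char Int)
    need.items.all (fun p => p.2 ≤ avail.getD p.1 0)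

-- ===== PRECONDITION & SPEC =====
-- Pre_ excludes exactly the lists with fewer than two elements, on which Python A raises IndexError.
def Pre_scramble (words : List String) : Prop := 2 ≤ words.length
instance (words : List String) : Decidable (Pre_scramble words) := by unfold Pre_scramble; infer_instance
def pvWitness_scramble : List String := (["cabba", "ab"])

def Spec_scramble (words : List String) (out : Bool) : Prop := out = scramble_alt words
instance (words : List String) (out : Bool) : Decidable (Spec_scramble words out) := by unfold Spec_scramble; infer_instance

-- ===== CLAIM (what is proved, stated in full; the proofs are below) =====
def Claim_equal_scramble : Prop := ∀ (words : List String), Dom_scramble words → Pre_scramble words → Spec_scramble words (scramble words)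

-- ===== LEMMAS AND PROOFS =====

-- A's loop returns true iff str2's character multiset is contained in str1's
lemma scrambleGo_iff (cs2 cs1 : List Char) :
    scrambleGo cs1 cs2 = true ↔ ∀ c, cs2.count c ≤ cs1.count c := by
  induction cs2 generalizing cs1 with
  | nil => simp [scrambleGo]
  | cons c rest ih =>
    simp only [scrambleGo]
    by_cases h : c ∈ cs1
    · simp only [List.contains_iff_mem.mpr h, if_true, ih]
      have hc : 0 < cs1.count c := List.count_pos_iff.mpr h
      constructor
      · intro H d
        have hd := H d
        rw [List.count_erase] at hd
        rw [List.count_cons]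
        rcases eq_or_ne c d with h1 | h1
        · subst h1; simp at hd ⊢; omega
        · simp [h1] at hd ⊢; omega
      · intro H d
        have hd := H d
        rw [List.count_cons] at hd
        rw [List.count_erase]
        rcases eq_or_ne c d with h1 | h1
        · subst h1; simp at hd ⊢; omega
        · simp [h1] at hd ⊢; omega
    · have hcont : cs1.contains c = false := by simpa using h
      simp only [hcont, Bool.false_eq_true, if_false, false_iff]
      intro H
      have hc := H c
      rw [List.count_cons_self, List.count_eq_zero.mpr h] at hc
      omega

-- B's dict computation returns true iff the same multiset containment holds
lemma scramble_alt_body_iff (s1 s2 : List Char) :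
    ((s2.foldl (fun d c => d.insert c (d.getD c 0 + 1)) (PySem.Dict.empty : PySem.Dict Char Int)).items.all
      (fun p => p.2 ≤ (s1.foldl (fun d c => d.insert c (d.getD c 0 + 1)) (PySem.Dict.empty : PySem.Dict Char Int)).getD p.1 0)) = true
    ↔ ∀ c, s2.count c ≤ s1.count c := by
  rw [PySem.Dict.foldl_insert_getD_add_one_eq_counter, PySem.Dict.foldl_insert_getD_add_one_eq_counter,
      PySem.Dict.items_counter]
  simp only [List.all_map, List.all_eq_true, Function.comp, decide_eq_true_eq,
    PySem.Dict.getD_counter]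
  constructor
  · intro H c
    by_cases hc : c ∈ s2
    · have := H c ((PySem.Set.mem_ofList _ _).mpr hc)
      exact_mod_cast this
    · simp [List.count_eq_zero.mpr hc]
  · intro H c hc
    exact_mod_cast H c

-- ===== VERDICT (by name: the statement is the Claim_ definition above) =====
theorem scramble_spec : Claim_equal_scramble := by
  intro words _ hpre
  unfold Pre_scramble at hpre
  match words with
  | a :: b :: t =>
    unfold Spec_scramble scramble scramble_alt
    have h0 : PySem.List.pyGet? (a :: b :: t) 0 = some a := by
      have := PySem.List.pyGet?_natCast (xs := a :: b :: t) (n := 0); simpa using this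
    have h1 : PySem.List.pyGet? (a :: b :: t) 1 = some b := by
      have := PySem.List.pyGet?_natCast (xs := a :: b :: t) (n := 1); simpa using this
    rw [h0, h1]
    rw [Bool.eq_iff_iff, scrambleGo_iff]
    exact (scramble_alt_body_iff a.toList b.toList).symm
  | [] => simp at hpre
  | [a] => simp at hpre
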